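-- pv_equiv track=rewrite | github.com/apaditya7/panasonic_venture_poc | backend/app/services/llm_service.py | clean_text_formatting
-- ===== SOURCE A (Python) =====
-- def clean_text_formatting(text: str) -> str:
--     """Clean up text formatting for better readability"""
--     if not text:
--         return ""
--
--     # Split into lines and clean
--     lines = [line.strip() for line in text.split('\n')]
--
--     # Remove empty lines at start and end
--     while lines and not lines[0]:
--         lines.pop(0)
--     while lines and not lines[-1]:
--         lines.pop()
--
--     # Process lines for better formatting
--     formatted_lines = []
--     prev_was_header = False
--
--     for i, line in enumerate(lines):
--         if not line:
--             # Only add empty line if previous wasn't already empty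
--             if formatted_lines and formatted_lines[-1]:
--                 formatted_lines.append("")
--             continue
--
--         # Handle headers (## or **)
--         is_header = line.startswith('##') or (line.startswith('**') and line.endswith('**:'))
--
--         # Add spacing before headers (except first line)
--         if is_header and formatted_lines and formatted_lines[-1]:
--             formatted_lines.append("")
--
--         formatted_lines.append(line)
--         prev_was_header = is_header
--
--     return '\n'.join(formatted_lines)
-- ===== SOURCE B (Python) =====
-- def clean_text_formatting(text: str) -> str:
--     """Clean up text formatting for better readability"""
--     if not text:
--         return ""
--
--     # Single pass: accumulate the output string directly, choosing the
--     # separator before each content line ('\n\n' after a blank run or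
--     # before a header, '\n' otherwise); blanks never materialize.
--     out = None
--     gap = False
--     for raw in text.split('\n'):
--         line = raw.strip()
--         if not line:
--             gap = True
--             continue
--         if out is None:
--             out = line
--         else:
--             wide = gap or line.startswith('##') or (line.startswith('**') and line.endswith('**:'))
--             out += ('\n\n' if wide else '\n') + line
--         gap = False
--     return out if out is not None else ""
-- ===== Notes on version B (the rewrite author's own statement) =====
-- stated objective: simpler
-- what changed: A's four-stage pipeline (strip every line, trim blank lines off both ends, build a formatted line list with a stateful loop, join with newlines) is replaced by a single pass that accumulates the output string directly, choosing the separator before each content line ('\n\n' after a blank run or before a header, '\n' otherwise), so no intermediate line lists, blank lines or trim passes exist at all.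
import Mathlib
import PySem

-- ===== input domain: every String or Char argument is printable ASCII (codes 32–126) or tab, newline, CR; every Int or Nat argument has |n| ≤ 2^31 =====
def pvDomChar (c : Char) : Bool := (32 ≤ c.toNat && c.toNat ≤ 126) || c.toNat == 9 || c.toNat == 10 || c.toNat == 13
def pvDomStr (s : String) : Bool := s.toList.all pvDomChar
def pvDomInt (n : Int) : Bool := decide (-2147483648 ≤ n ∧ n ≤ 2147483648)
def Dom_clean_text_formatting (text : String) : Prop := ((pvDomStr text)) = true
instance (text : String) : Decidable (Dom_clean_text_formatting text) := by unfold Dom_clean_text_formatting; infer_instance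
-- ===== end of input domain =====

-- B replaces A's staged pipeline (strip-map, trim both ends, stateful line-list
-- building, join) by one pass that accumulates the output string directly,
-- picking the separator before each content line; objective: simpler.

-- ===== PORT A =====
-- line.startswith('##') or (line.startswith('**') and line.endswith('**:'))
def pvIsHeader (line : String) : Bool :=
  PySem.Str.startswith line "##" ||
    (PySem.Str.startswith line "**" && PySem.Str.endswith line "**:")

-- the body of A's for-loop: state is (formatted_lines, prev_was_header)
def pvAstep (st : List String × Bool) (line : String) : List String × Bool :=
  if line = "" then
    -- `continue` leaves prev_was_header unchanged
    (if (st.1.getLast?.getD "") ≠ "" then st.1 ++ [""] else st.1, st.2)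
  else
    let is_header := pvIsHeader line
    (((if is_header && (st.1.getLast?.getD "") ≠ "" then st.1 ++ [""] else st.1) ++ [line]),
      is_header)

def clean_text_formatting (text : String) : String :=
  if text = "" then "" else
  let lines := (((PySem.Str.split? text "\n").getD []) : List String).map PySem.Str.strip
  -- while lines and not lines[0]: lines.pop(0)
  let lines := lines.dropWhile (· = "")
  -- while lines and not lines[-1]: lines.pop()
  let lines := (lines.reverse.dropWhile (· = "")).reverse
  let formatted := (lines.foldl pvAstep ([], false)).1
  PySem.Str.join "\n" formatted

-- ===== PORT B =====
-- B's loop body: state is (out : Optional[str], gap : bool); strips the raw line,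
-- on blank just records the gap, otherwise appends separator + line to out.
def pvBstep (st : Option String × Bool) (raw : String) : Option String × Bool :=
  let line := PySem.Str.strip raw
  if line = "" then (st.1, true)
  else
    match st.1 with
    | none => (some line, false)
    | some out =>
      let wide := st.2 || PySem.Str.startswith line "##" ||
        (PySem.Str.startswith line "**" && PySem.Str.endswith line "**:")
      (some (out ++ (if wide then "\n\n" else "\n") ++ line), false)

def clean_text_formatting_alt (text : String) : String :=
  if text = "" then "" else
  (((((PySem.Str.split? text "\n").getD []) : List String).foldl pvBstep (none, false)).1).getD ""

-- ===== PRECONDITION & SPEC =====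
def Spec_clean_text_formatting (text : String) (out : String) : Prop := out = clean_text_formatting_alt text
instance (text : String) (out : String) : Decidable (Spec_clean_text_formatting text out) := by unfold Spec_clean_text_formatting; infer_instance

-- ===== CLAIM (what is proved, stated in full; the proofs are below) =====
def Claim_equal_clean_text_formatting : Prop := ∀ (text : String), Dom_clean_text_formatting text → Spec_clean_text_formatting text (clean_text_formatting text)

-- ===== LEMMAS AND PROOFS =====

-- trailing-blank trim, as A writes it (proof-side abbreviation)
def pvTE (l : List String) : List String := (l.reverse.dropWhile (· = "")).reverse

lemma pvJoin_snoc_chars (sep : List Char) :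
    ∀ (l : List (List Char)) (x : List Char), l ≠ [] →
      PySem.Chars.join sep (l ++ [x]) = PySem.Chars.join sep l ++ sep ++ x
  | [], _, h => absurd rfl h
  | [a], x, _ => by
      simp [PySem.Chars.join_cons_cons, PySem.Chars.join_singleton]
  | a :: b :: r, x, _ => by
      have ih := pvJoin_snoc_chars sep (b :: r) x (by simp)
      simp only [List.cons_append, PySem.Chars.join_cons_cons] at *
      rw [ih]
      simp [List.append_assoc]

lemma pvJoin_snoc (acc : List String) (y : String) (h : acc ≠ []) :
    PySem.Str.join "\n" (acc ++ [y]) = PySem.Str.join "\n" acc ++ "\n" ++ y := by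
  apply String.toList_inj.mp
  simp only [PySem.Str.toList_join, String.toList_append, List.map_append, List.map_cons,
    List.map_nil]
  exact pvJoin_snoc_chars _ _ _ (by simpa using h)

lemma pvJoin_one (x : String) : PySem.Str.join "\n" [x] = x := by
  apply String.toList_inj.mp
  simp [PySem.Str.toList_join, PySem.Chars.join_singleton]

lemma pvTE_cons_ne (x : String) (xs : List String) (hx : x ≠ "") :
    pvTE (x :: xs) = x :: pvTE xs := by
  unfold pvTE
  rw [List.reverse_cons, List.dropWhile_append]
  split_ifs with h
  · rw [List.isEmpty_iff] at h
    simp [h, hx]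
  · simp

lemma pvTE_cons_blank (xs : List String) :
    pvTE ("" :: xs) = if pvTE xs = [] then [] else "" :: pvTE xs := by
  unfold pvTE
  rw [List.reverse_cons, List.dropWhile_append]
  by_cases h : List.dropWhile (fun x => decide (x = "")) xs.reverse = []
  · simp [h]
  · simp [h, List.isEmpty_iff]

lemma pvNe_nil_of_last {acc : List String} (hlast : (acc.getLast?.getD "") ≠ "") : acc ≠ [] := by
  intro h; subst h; simp at hlast

-- core invariant: B's running string = '\n'-join of A's formatted line list,
-- with g = true exactly when A's list would carry a pending trailing blank
lemma pvMain : ∀ (s acc : List String) (p g : Bool) (out : String),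
    (acc.getLast?.getD "") ≠ "" → PySem.Str.join "\n" acc = out →
    ((s.foldl pvBstep (some out, g)).1).getD ""
      = PySem.Str.join "\n" (((pvTE (s.map PySem.Str.strip)).foldl pvAstep
          ((if g = true ∧ pvTE (s.map PySem.Str.strip) ≠ [] then acc ++ [""] else acc), p)).1) := by
  intro s
  induction s with
  | nil =>
    intro acc p g out hlast hout
    simp [pvTE, hout]
  | cons r s' ih =>
    intro acc p g out hlast hout
    have haccne : acc ≠ [] := pvNe_nil_of_last hlast
    by_cases hl : PySem.Str.strip r = ""
    · have hB : pvBstep (some out, g) r = (some out, true) := by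
        simp [pvBstep, hl]
      rw [List.foldl_cons, hB, List.map_cons, hl, pvTE_cons_blank]
      by_cases hte : pvTE (s'.map PySem.Str.strip) = []
      · rw [if_pos hte]
        simpa [hte] using ih acc p true out hlast hout
      · rw [if_neg hte]
        have hstep1 : pvAstep (acc, p) "" = (acc ++ [""], p) := by
          simp [pvAstep, hlast]
        have hstep2 : pvAstep (acc ++ [""], p) "" = (acc ++ [""], p) := by
          simp [pvAstep]
        have h2 := ih acc p true out hlast hout
        rw [if_pos ⟨rfl, hte⟩] at h2
        cases g with
        | false =>
          simp only [show ((false = true ∧ ("" :: pvTE (s'.map PySem.Str.strip)) ≠ []) = False) by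
            simp, if_neg (by simp : ¬False)]
          rw [List.foldl_cons, hstep1]
          exact h2
        | true =>
          rw [if_pos ⟨rfl, by simp⟩, List.foldl_cons, hstep2]
          exact h2
    · have hwB : ∀ g' : Bool, pvBstep (some out, g') r =
          (some (out ++ (if (g' || pvIsHeader (PySem.Str.strip r)) then "\n\n" else "\n")
            ++ PySem.Str.strip r), false) := by
        intro g'
        simp [pvBstep, pvIsHeader, hl, Bool.or_assoc]
      have hnn : ("\n" : String) ++ "\n" = "\n\n" := rfl
      have hJ2 : PySem.Str.join "\n" ((acc ++ [""]) ++ [PySem.Str.strip r])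
          = out ++ "\n\n" ++ PySem.Str.strip r := by
        rw [pvJoin_snoc _ _ (by simp), pvJoin_snoc _ _ haccne, hout]
        simp [String.append_assoc, hnn]
      have hJ1 : PySem.Str.join "\n" (acc ++ [PySem.Str.strip r])
          = out ++ "\n" ++ PySem.Str.strip r := by
        rw [pvJoin_snoc _ _ haccne, hout]
      have hlast' : ∀ l : List String, ((l ++ [PySem.Str.strip r]).getLast?.getD "") ≠ "" := by
        intro l; simp [hl]
      rw [List.foldl_cons, List.map_cons, pvTE_cons_ne _ _ hl]
      cases g with
      | false =>
        rw [if_neg (show ¬(false = true ∧ PySem.Str.strip r :: pvTE (List.map PySem.Str.strip s') ≠ []) from by simp), hwB false]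
        by_cases hh : pvIsHeader (PySem.Str.strip r) = true
        · have hstep : pvAstep (acc, p) (PySem.Str.strip r)
              = ((acc ++ [""]) ++ [PySem.Str.strip r], pvIsHeader (PySem.Str.strip r)) := by
            simp [pvAstep, hl, hh, hlast]
          rw [List.foldl_cons, hstep]
          have h2 := ih ((acc ++ [""]) ++ [PySem.Str.strip r]) (pvIsHeader (PySem.Str.strip r))
            false (out ++ "\n\n" ++ PySem.Str.strip r) (hlast' _) hJ2
          rw [if_neg (by simp)] at h2
          simpa [hh] using h2
        · have hstep : pvAstep (acc, p) (PySem.Str.strip r)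
              = (acc ++ [PySem.Str.strip r], pvIsHeader (PySem.Str.strip r)) := by
            simp [pvAstep, hl, hh]
          rw [List.foldl_cons, hstep]
          have h2 := ih (acc ++ [PySem.Str.strip r]) (pvIsHeader (PySem.Str.strip r))
            false (out ++ "\n" ++ PySem.Str.strip r) (hlast' _) hJ1
          rw [if_neg (by simp)] at h2
          simpa [hh] using h2
      | true =>
        rw [if_pos (show (true = true ∧ PySem.Str.strip r :: pvTE (List.map PySem.Str.strip s') ≠ []) from ⟨rfl, by simp⟩), hwB true]
        have hstep : pvAstep (acc ++ [""], p) (PySem.Str.strip r)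
            = ((acc ++ [""]) ++ [PySem.Str.strip r], pvIsHeader (PySem.Str.strip r)) := by
          simp [pvAstep, hl]
        rw [List.foldl_cons, hstep]
        have h2 := ih ((acc ++ [""]) ++ [PySem.Str.strip r]) (pvIsHeader (PySem.Str.strip r))
          false (out ++ "\n\n" ++ PySem.Str.strip r) (hlast' _) hJ2
        rw [if_neg (by simp)] at h2
        simpa using h2

-- leading phase: before the first content line B carries `none`, A drops the blanks
lemma pvLead : ∀ (raw : List String) (g : Bool),
    ((raw.foldl pvBstep (none, g)).1).getD ""
      = PySem.Str.join "\n"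
          (((pvTE ((raw.map PySem.Str.strip).dropWhile (· = ""))).foldl pvAstep ([], false)).1) := by
  intro raw
  induction raw with
  | nil => intro g; simp [pvTE]; rfl
  | cons r raw' ih =>
    intro g
    by_cases hl : PySem.Str.strip r = ""
    · have hB : pvBstep (none, g) r = (none, true) := by
        simp [pvBstep, hl]
      rw [List.foldl_cons, hB, List.map_cons, hl]
      rw [show List.dropWhile (· = "") ("" :: raw'.map PySem.Str.strip)
            = List.dropWhile (· = "") (raw'.map PySem.Str.strip) by simp]
      exact ih true
    · have hB : pvBstep (none, g) r = (some (PySem.Str.strip r), false) := by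
        simp [pvBstep, hl]
      rw [List.foldl_cons, hB, List.map_cons]
      rw [show List.dropWhile (· = "") (PySem.Str.strip r :: raw'.map PySem.Str.strip)
            = PySem.Str.strip r :: raw'.map PySem.Str.strip by simp [hl]]
      rw [pvTE_cons_ne _ _ hl]
      have hstep : pvAstep ([], false) (PySem.Str.strip r)
          = ([PySem.Str.strip r], pvIsHeader (PySem.Str.strip r)) := by
        simp [pvAstep, hl]
      rw [List.foldl_cons, hstep]
      have h2 := pvMain raw' [PySem.Str.strip r] (pvIsHeader (PySem.Str.strip r)) false
        (PySem.Str.strip r) (by simp [hl]) (pvJoin_one _)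
      rw [if_neg (by simp)] at h2
      exact h2

-- ===== VERDICT (by name: the statement is the Claim_ definition above) =====
theorem clean_text_formatting_spec : Claim_equal_clean_text_formatting := by
  intro text _
  unfold Spec_clean_text_formatting clean_text_formatting clean_text_formatting_alt
  by_cases h : text = ""
  · simp [h]
  · simp only [if_neg h]
    exact (pvLead (((PySem.Str.split? text "\n").getD []) : List String) false).symm
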